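-- pv_equiv track=rewrite | github.com/annachemerisbvg4-stack/GopiAI | tests/security/test_runner_security.py | _extract_requirement
-- ===== SOURCE A (Python) =====
-- from typing import Dict, List, Any, Optional
--
-- def _extract_requirement(test: Dict[str, Any]) -> str:
--     """Extract requirement number from test data."""
--     test_name = test.get("nodeid", "").lower()
--
--     # Map test patterns to requirements
--     if any(keyword in test_name for keyword in ["injection", "xss", "csrf", "validation"]):
--         return "7.1"
--     elif any(keyword in test_name for keyword in ["secret", "api_key", "password", "environment"]):
--         return "7.2"
--     elif any(keyword in test_name for keyword in ["auth", "session", "token", "login"]):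
--         return "7.3"
--     elif any(keyword in test_name for keyword in ["file", "path", "upload", "directory"]):
--         return "7.4"
--     else:
--         return "7.x"
-- ===== SOURCE B (Python) =====
-- _KEYWORD_REQ = {
--     "injection": "7.1", "xss": "7.1", "csrf": "7.1", "validation": "7.1",
--     "secret": "7.2", "api_key": "7.2", "password": "7.2", "environment": "7.2",
--     "auth": "7.3", "session": "7.3", "token": "7.3", "login": "7.3",
--     "file": "7.4", "path": "7.4", "upload": "7.4", "directory": "7.4",
-- }
--
--
-- def _extract_requirement(test):
--     """Extract requirement number: collect every requirement whose keyword occurs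
--     in the nodeid and take the smallest label (labels sort as the group order)."""
--     name = test.get("nodeid", "").lower()
--     matches = [req for kw, req in _KEYWORD_REQ.items() if kw in name]
--     return min(matches, default="7.x")
-- ===== Notes on version B (the rewrite author's own statement) =====
-- stated objective: alternative
-- what changed: Instead of testing the four keyword groups in order and returning on the first hit, B uses a flat keyword-to-requirement map, collects ALL requirements whose keyword occurs in the nodeid, and returns the lexicographic minimum (default '7.x'); the labels sort exactly as the group order, so min equals A's first match.
import Mathlib
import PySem

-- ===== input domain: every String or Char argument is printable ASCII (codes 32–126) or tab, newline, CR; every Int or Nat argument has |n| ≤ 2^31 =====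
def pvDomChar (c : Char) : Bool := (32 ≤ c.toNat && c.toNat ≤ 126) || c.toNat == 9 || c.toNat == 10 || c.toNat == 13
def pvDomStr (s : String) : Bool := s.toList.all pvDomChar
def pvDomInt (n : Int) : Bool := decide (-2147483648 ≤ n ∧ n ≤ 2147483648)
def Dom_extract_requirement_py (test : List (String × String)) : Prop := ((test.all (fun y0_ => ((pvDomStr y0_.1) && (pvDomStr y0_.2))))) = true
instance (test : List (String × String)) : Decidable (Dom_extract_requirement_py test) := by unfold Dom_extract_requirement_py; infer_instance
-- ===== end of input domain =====

-- B replaces the ordered first-match branch cascade by a flat keyword→requirement map: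
-- it collects ALL matching requirement labels and returns their minimum (objective: alternative).

-- ===== PORT A =====
-- the branch cascade over the local variable test_name
def requirementOf (test_name : String) : String :=
  if ["injection", "xss", "csrf", "validation"].any (fun kw => PySem.Str.isIn kw test_name) then "7.1"
  else if ["secret", "api_key", "password", "environment"].any (fun kw => PySem.Str.isIn kw test_name) then "7.2"
  else if ["auth", "session", "token", "login"].any (fun kw => PySem.Str.isIn kw test_name) then "7.3"
  else if ["file", "path", "upload", "directory"].any (fun kw => PySem.Str.isIn kw test_name) then "7.4"
  else "7.x"

-- test.get("nodeid", "") on the association list: first matching key, else default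
def extract_requirement_py (test : List (String × String)) : String :=
  requirementOf (PySem.Str.lower (((test.find? (fun p => p.1 == "nodeid")).map (fun p => p.2)).getD ""))

-- ===== PORT B =====
-- the flat keyword → requirement dictionary _KEYWORD_REQ, in insertion order
def kwReq : List (String × String) :=
  [("injection", "7.1"), ("xss", "7.1"), ("csrf", "7.1"), ("validation", "7.1"),
   ("secret", "7.2"), ("api_key", "7.2"), ("password", "7.2"), ("environment", "7.2"),
   ("auth", "7.3"), ("session", "7.3"), ("token", "7.3"), ("login", "7.3"),
   ("file", "7.4"), ("path", "7.4"), ("upload", "7.4"), ("directory", "7.4")]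

-- ms = [req for kw, req in _KEYWORD_REQ.items() if kw in name]; then min(ms, default="7.x")
def minRequirement (name : String) : String :=
  (PySem.List.min? (kwReq.filterMap (fun p => if PySem.Str.isIn p.1 name then some p.2 else none)) (fun x => x)).getD "7.x"

def extract_requirement_py_alt (test : List (String × String)) : String :=
  minRequirement (PySem.Str.lower (((test.find? (fun p => p.1 == "nodeid")).map (fun p => p.2)).getD ""))

-- ===== PRECONDITION & SPEC =====
def Spec_extract_requirement_py (test : List (String × String)) (out : String) : Prop := out = extract_requirement_py_alt test
instance (test : List (String × String)) (out : String) : Decidable (Spec_extract_requirement_py test out) := by unfold Spec_extract_requirement_py; infer_instance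

-- ===== CLAIM (what is proved, stated in full; the proofs are below) =====
def Claim_equal_extract_requirement_py : Prop := ∀ (test : List (String × String)), Dom_extract_requirement_py test → Spec_extract_requirement_py test (extract_requirement_py test)

-- ===== LEMMAS AND PROOFS =====

-- each label is ≤ every later label
theorem le_71 : ∀ x ∈ (["7.1", "7.2", "7.3", "7.4"] : List String), ("7.1" : String) ≤ x := by
  intro x hx; fin_cases hx <;> simp [String.le_iff_toList_le] <;> decide
theorem le_72 : ∀ x ∈ (["7.2", "7.3", "7.4"] : List String), ("7.2" : String) ≤ x := by
  intro x hx; fin_cases hx <;> simp [String.le_iff_toList_le] <;> decide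
theorem le_73 : ∀ x ∈ (["7.3", "7.4"] : List String), ("7.3" : String) ≤ x := by
  intro x hx; fin_cases hx <;> simp [String.le_iff_toList_le] <;> decide

-- folding min over a list the seed already bounds leaves the seed
theorem foldl_min_of_le (s : String) (l : List String) (h : ∀ x ∈ l, s ≤ x) : l.foldl min s = s := by
  induction l with
  | nil => rfl
  | cons a t ih =>
    have hs : min s a = s := min_eq_left (h a (by simp))
    simpa [List.foldl_cons, hs] using ih (fun x hx => h x (by simp [hx]))

-- min over four label-homogeneous blocks is the label of the first nonempty block
theorem min_cascade (l1 l2 l3 l4 : List String)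
    (h1 : ∀ x ∈ l1, x = "7.1") (h2 : ∀ x ∈ l2, x = "7.2")
    (h3 : ∀ x ∈ l3, x = "7.3") (h4 : ∀ x ∈ l4, x = "7.4") :
    (PySem.List.min? (l1 ++ (l2 ++ (l3 ++ l4))) (fun x => x)).getD "7.x" =
      (if l1 ≠ [] then "7.1" else if l2 ≠ [] then "7.2" else if l3 ≠ [] then "7.3"
       else if l4 ≠ [] then "7.4" else "7.x") := by
  have hmem4 : ∀ x ∈ l4, ("7.4" : String) ≤ x := fun x hx => le_of_eq (h4 x hx).symm
  have hmem3 : ∀ x ∈ l3 ++ l4, ("7.3" : String) ≤ x := by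
    intro x hx; rcases List.mem_append.1 hx with h | h
    · exact le_73 _ (by simp [h3 x h])
    · exact le_73 _ (by simp [h4 x h])
  have hmem2 : ∀ x ∈ l2 ++ (l3 ++ l4), ("7.2" : String) ≤ x := by
    intro x hx; rcases List.mem_append.1 hx with h | h
    · exact le_72 _ (by simp [h2 x h])
    · rcases List.mem_append.1 h with h' | h'
      · exact le_72 _ (by simp [h3 x h'])
      · exact le_72 _ (by simp [h4 x h'])
  have hmem1 : ∀ x ∈ l1 ++ (l2 ++ (l3 ++ l4)), ("7.1" : String) ≤ x := by
    intro x hx; rcases List.mem_append.1 hx with h | h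
    · exact le_71 _ (by simp [h1 x h])
    · rcases List.mem_append.1 h with h' | h'
      · exact le_71 _ (by simp [h2 x h'])
      · rcases List.mem_append.1 h' with h'' | h''
        · exact le_71 _ (by simp [h3 x h''])
        · exact le_71 _ (by simp [h4 x h''])
  cases l1 with
  | cons a t =>
    have ha := h1 a (by simp)
    subst ha
    rw [List.cons_append, PySem.List.min?_id_cons]
    simp only [Option.getD_some, reduceCtorEq, not_false_eq_true, if_pos]
    exact foldl_min_of_le _ _ (fun x hx => hmem1 x (by simp [List.mem_append] at hx ⊢; tauto))
  | nil =>
  simp only [List.nil_append, not_true_eq_false, if_neg, not_false_eq_true]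
  cases l2 with
  | cons a t =>
    have ha := h2 a (by simp)
    subst ha
    rw [List.cons_append, PySem.List.min?_id_cons]
    simp only [Option.getD_some, reduceCtorEq, not_false_eq_true, if_pos]
    exact foldl_min_of_le _ _ (fun x hx => hmem2 x (by simp [List.mem_append] at hx ⊢; tauto))
  | nil =>
  simp only [List.nil_append, not_true_eq_false, if_neg, not_false_eq_true]
  cases l3 with
  | cons a t =>
    have ha := h3 a (by simp)
    subst ha
    rw [List.cons_append, PySem.List.min?_id_cons]
    simp only [Option.getD_some, reduceCtorEq, not_false_eq_true, if_pos]
    exact foldl_min_of_le _ _ (fun x hx => hmem3 x (by simp [List.mem_append] at hx ⊢; tauto))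
  | nil =>
  simp only [List.nil_append, not_true_eq_false, if_neg, not_false_eq_true]
  cases l4 with
  | cons a t =>
    have ha := h4 a (by simp)
    subst ha
    rw [PySem.List.min?_id_cons]
    simp only [Option.getD_some, reduceCtorEq, not_false_eq_true, if_pos]
    exact foldl_min_of_le _ _ (fun x hx => hmem4 x (by simp [hx]))
  | nil => simp [PySem.List.min?]

-- every element of a keyword block is its label
theorem blk_mem (p : String → Bool) (k1 k2 k3 k4 s : String) :
    ∀ x ∈ List.filterMap (fun q : String × String => if p q.1 then some q.2 else none)
        [(k1, s), (k2, s), (k3, s), (k4, s)], x = s := by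
  intro x hx
  simp only [List.mem_filterMap, List.mem_cons, List.not_mem_nil, or_false] at hx
  rcases hx with ⟨a, ha, hfa⟩
  rcases ha with rfl | rfl | rfl | rfl <;>
    exact (Option.some.inj (Option.ite_none_right_eq_some.mp hfa).2).symm
-- a keyword block is nonempty exactly when some keyword of the group matches
theorem blk_ne_nil (p : String → Bool) (k1 k2 k3 k4 s : String) :
    (List.filterMap (fun q : String × String => if p q.1 then some q.2 else none)
        [(k1, s), (k2, s), (k3, s), (k4, s)] ≠ []) ↔ ([k1, k2, k3, k4].any p = true) := by
  cases hp1 : p k1 <;> cases hp2 : p k2 <;> cases hp3 : p k3 <;> cases hp4 : p k4 <;>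
    simp [hp1, hp2, hp3, hp4]

-- B's collect-all-then-min equals A's first-match cascade, for any match predicate p
theorem main_key (p : String → Bool) :
    (PySem.List.min? (kwReq.filterMap (fun q => if p q.1 then some q.2 else none)) (fun x => x)).getD "7.x" =
      (if ["injection", "xss", "csrf", "validation"].any p then "7.1"
       else if ["secret", "api_key", "password", "environment"].any p then "7.2"
       else if ["auth", "session", "token", "login"].any p then "7.3"
       else if ["file", "path", "upload", "directory"].any p then "7.4"
       else "7.x") := by
  have hk : kwReq =
      [("injection", "7.1"), ("xss", "7.1"), ("csrf", "7.1"), ("validation", "7.1")] ++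
      ([("secret", "7.2"), ("api_key", "7.2"), ("password", "7.2"), ("environment", "7.2")] ++
       ([("auth", "7.3"), ("session", "7.3"), ("token", "7.3"), ("login", "7.3")] ++
        [("file", "7.4"), ("path", "7.4"), ("upload", "7.4"), ("directory", "7.4")])) := rfl
  rw [hk, List.filterMap_append, List.filterMap_append, List.filterMap_append,
    min_cascade _ _ _ _ (blk_mem p _ _ _ _ _) (blk_mem p _ _ _ _ _)
      (blk_mem p _ _ _ _ _) (blk_mem p _ _ _ _ _)]
  simp only [blk_ne_nil]

-- the two ports agree for any preprocessed nodeid string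
theorem ports_eq (name : String) : requirementOf name = minRequirement name := by
  unfold requirementOf minRequirement
  exact (main_key (fun kw => PySem.Str.isIn kw name)).symm

-- ===== VERDICT (by name: the statement is the Claim_ definition above) =====
theorem extract_requirement_py_spec : Claim_equal_extract_requirement_py := by
  intro test _
  unfold Spec_extract_requirement_py extract_requirement_py extract_requirement_py_alt
  exact ports_eq _
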